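-- pv_equiv track=rewrite | github.com/FEIPNG/kernel_data_challenge | library_for_submissions.py | generate_mismatch_neighbors
-- ===== SOURCE A (Python) =====
-- def generate_mismatch_neighbors(kmer, m, alphabet = "ACGT"):
--     """
--     Generate all possible k-mers that are within 'm' mismatches of the given k-mer.
--
--     Args:
--         kmer (str): The original k-mer.
--         m (int): Maximum allowed mismatches.
--         alphabet (str): Possible characters in the k-mers (e.g., "ACGT").
--
--     Returns:
--         set: A set of k-mers within m mismatches.
--     """
--     if m == 0:
--         return {kmer}  # No mismatches allowed, return the k-mer itself
--
--     n = len(kmer)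
--     mismatch_neighbors = set()
--
--     # Generate all possible positions and substitutions up to m mismatches
--     def generate(pos, mismatches, current_kmer):
--         if mismatches > m:  # Stop if we exceed the allowed mismatches
--             return
--         if pos == n:  # If we processed all positions, add the modified k-mer
--             mismatch_neighbors.add("".join(current_kmer))
--             return
--
--         # Keep the original character (no mismatch at this position)
--         generate(pos + 1, mismatches, current_kmer)
--
--         # Try all possible mismatches at the current position
--         original_char = current_kmer[pos]
--         for char in alphabet:
--             if char != original_char:  # Only substitute if it's different
--                 current_kmer[pos] = char
--                 generate(pos + 1, mismatches + 1, current_kmer)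
--                 current_kmer[pos] = original_char  # Restore original
--
--     generate(0, 0, list(kmer))
--     return mismatch_neighbors
-- ===== SOURCE B (Python) =====
-- def generate_mismatch_neighbors(kmer, m, alphabet="ACGT"):
--     """Iterative left-to-right expansion: no recursion, no in-place mutation."""
--     if m < 0:
--         return set()
--     partial = [("", 0)]  # (prefix built so far, mismatches used)
--     for ch in kmer:
--         nxt = []
--         for s, d in partial:
--             nxt.append((s + ch, d))
--             if d < m:
--                 for c in alphabet:
--                     if c != ch:
--                         nxt.append((s + c, d + 1))
--         partial = nxt
--     return {s for s, _ in partial}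
-- ===== Notes on version B (the rewrite author's own statement) =====
-- stated objective: alternative
-- what changed: Replaces A's keep-vs-substitute recursion with in-place list mutation by an iterative left-to-right dynamic expansion of (prefix, mismatch-count) pairs over the kmer's positions, collecting the final prefixes into the set.
import Mathlib
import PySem

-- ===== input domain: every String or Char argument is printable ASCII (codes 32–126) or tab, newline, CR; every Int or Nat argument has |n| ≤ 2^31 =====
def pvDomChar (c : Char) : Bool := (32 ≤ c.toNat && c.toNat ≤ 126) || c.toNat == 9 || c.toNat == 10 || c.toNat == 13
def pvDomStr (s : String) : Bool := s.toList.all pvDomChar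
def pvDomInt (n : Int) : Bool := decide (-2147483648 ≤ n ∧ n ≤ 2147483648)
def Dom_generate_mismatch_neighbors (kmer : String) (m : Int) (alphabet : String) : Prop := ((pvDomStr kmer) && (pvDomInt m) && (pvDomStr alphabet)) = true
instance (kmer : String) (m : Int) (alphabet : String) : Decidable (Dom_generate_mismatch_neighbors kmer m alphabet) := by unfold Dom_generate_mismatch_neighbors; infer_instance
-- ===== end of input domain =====

-- B replaces A's keep-vs-substitute recursion (with in-place mutation) by an iterative
-- left-to-right expansion of (prefix, mismatches) pairs; objective: simpler/alternative, not faster.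

-- ===== PORT A =====
-- generate(pos, mismatches, current_kmer): 'done' is current_kmer[:pos], 'todo' is kmer[pos:]
-- (current_kmer[pos] always holds the original character when read, since A restores after each substitution);
-- the result set mutated by the closure is threaded as 'acc'.
def pvGenA (m : Int) (alph : List Char) (done todo : List Char) (mism : Int) (acc : PySem.Set String) : PySem.Set String :=
  if m < mism then acc
  else
    match todo with
    | [] => PySem.Set.add acc (String.ofList done)
    | ch :: rest =>
      let acc1 := pvGenA m alph (done ++ [ch]) rest mism acc
      alph.foldl (fun a c => if c ≠ ch then pvGenA m alph (done ++ [c]) rest (mism + 1) a else a) acc1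
termination_by todo.length
decreasing_by all_goals simp

def generate_mismatch_neighbors (kmer : String) (m : Int) (alphabet : String) : List String :=
  if m = 0 then [kmer]
  else pvGenA m alphabet.toList [] kmer.toList 0 PySem.Set.empty

-- ===== PORT B =====
-- the body of 'for s, d in partial' in Source B: append the keep-extension, then the substitutions
def pvExtB (m : Int) (alph : List Char) (ch : Char) (nxt : List (List Char × Int)) (p : List Char × Int) : List (List Char × Int) :=
  let nxt := nxt ++ [(p.1 ++ [ch], p.2)]
  if p.2 < m then
    alph.foldl (fun nxt c => if c ≠ ch then nxt ++ [(p.1 ++ [c], p.2 + 1)] else nxt) nxt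
  else nxt

def generate_mismatch_neighbors_alt (kmer : String) (m : Int) (alphabet : String) : List String :=
  if m < 0 then []
  else
    let part := kmer.toList.foldl
      (fun part ch => part.foldl (pvExtB m alphabet.toList ch) [])
      [(([] : List Char), (0 : Int))]
    PySem.Set.ofList (part.map (fun p => String.ofList p.1))

-- ===== PRECONDITION & SPEC =====
def Spec_generate_mismatch_neighbors (kmer : String) (m : Int) (alphabet : String) (out : List String) : Prop := out = generate_mismatch_neighbors_alt kmer m alphabet
instance (kmer : String) (m : Int) (alphabet : String) (out : List String) : Decidable (Spec_generate_mismatch_neighbors kmer m alphabet out) := by unfold Spec_generate_mismatch_neighbors; infer_instance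

-- ===== CLAIM (what is proved, stated in full; the proofs are below) =====
def Claim_equal_generate_mismatch_neighbors : Prop := ∀ (kmer : String) (m : Int) (alphabet : String), Dom_generate_mismatch_neighbors kmer m alphabet → Spec_generate_mismatch_neighbors kmer m alphabet (generate_mismatch_neighbors kmer m alphabet)

-- ===== LEMMAS AND PROOFS =====

-- the DFS leaf sequence: all completions of the remaining suffix with d mismatches used
def pvN (m : Int) (alph : List Char) : List Char → Int → List (List Char)
  | [], _ => [[]]
  | ch :: rest, d =>
    (pvN m alph rest d).map (ch :: ·) ++
    (if d < m then (alph.filter (· ≠ ch)).flatMap (fun c => (pvN m alph rest (d + 1)).map (c :: ·)) else [])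

-- a foldl of guarded set-dumps equals one set-dump of the filtered flatMap
theorem pvFoldl_guard_addAll {α β : Type} [BEq β] (xs : List α) (p : α → Prop) [DecidablePred p] (g : α → List β) :
    ∀ (a0 : PySem.Set β),
    xs.foldl (fun a x => if p x then List.foldl PySem.Set.add a (g x) else a) a0
      = List.foldl PySem.Set.add a0 ((xs.filter (fun x => decide (p x))).flatMap g) := by
  induction xs with
  | nil => intro a0; rfl
  | cons x xs ih =>
    intro a0
    by_cases h : p x <;> simp [h, ih, List.foldl_append]

theorem pvGenA_eq (m : Int) (alph : List Char) (todo : List Char) :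
    ∀ (done : List Char) (mism : Int) (acc : PySem.Set String), ¬ m < mism →
    pvGenA m alph done todo mism acc
      = List.foldl PySem.Set.add acc ((pvN m alph todo mism).map (fun t => String.ofList (done ++ t))) := by
  induction todo with
  | nil =>
    intro done mism acc hm
    simp [pvGenA, hm, pvN]
  | cons ch rest ih =>
    intro done mism acc hm
    rw [pvGenA]
    simp only [if_neg hm]
    by_cases h1 : m < mism + 1
    · -- mism = m: every substitution call returns its accumulator unchanged
      have hstep : ∀ (a : PySem.Set String) (c : Char),
          (if c ≠ ch then pvGenA m alph (done ++ [c]) rest (mism + 1) a else a) = a := by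
        intro a c
        split_ifs with hc
        · rw [pvGenA.eq_def]; simp only [if_pos h1]
        · rfl
      have hfold : ∀ (l : List Char) (a : PySem.Set String),
          l.foldl (fun a c => if c ≠ ch then pvGenA m alph (done ++ [c]) rest (mism + 1) a else a) a = a := by
        intro l; induction l with
        | nil => intro a; rfl
        | cons x l ihl => intro a; rw [List.foldl_cons, hstep a x]; exact ihl a
      rw [hfold]
      have hdm : ¬ mism < m := by omega
      rw [ih (done ++ [ch]) mism acc hm]
      simp only [pvN, if_neg hdm, List.append_nil, List.map_map]
      congr 1
      exact List.map_congr_left fun t _ => by simp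
    · -- mism < m: collect the substitution subtrees
      have hrw : (fun (a : PySem.Set String) c => if c ≠ ch then pvGenA m alph (done ++ [c]) rest (mism + 1) a else a)
          = (fun a c => if c ≠ ch then List.foldl PySem.Set.add a ((pvN m alph rest (mism + 1)).map (fun t => String.ofList (done ++ [c] ++ t))) else a) := by
        funext a c
        split_ifs with hc
        · rw [ih (done ++ [c]) (mism + 1) a h1]
        · rfl
      rw [hrw, ih (done ++ [ch]) mism acc hm,
        pvFoldl_guard_addAll alph (fun c => c ≠ ch)
          (fun c => (pvN m alph rest (mism + 1)).map (fun t => String.ofList (done ++ [c] ++ t)))]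
      have hdm : mism < m := by omega
      rw [show pvN m alph (ch :: rest) mism
            = ((pvN m alph rest mism).map (ch :: ·))
              ++ ((alph.filter (· ≠ ch)).flatMap fun c => (pvN m alph rest (mism + 1)).map (c :: ·)) from by
        rw [pvN]; rw [if_pos hdm]]
      rw [List.map_append, List.foldl_append]
      congr 1
      · congr 1
        rw [List.map_map]
        exact List.map_congr_left fun t _ => by simp
      · rw [List.map_flatMap]
        congr 1
        funext c
        rw [List.map_map]
        exact List.map_congr_left fun t _ => by simp

-- the extension list one (prefix, d) pair contributes for character ch (the body of Source B's middle loop)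
def pvExts (m : Int) (alph : List Char) (ch : Char) (p : List Char × Int) : List (List Char × Int) :=
  (p.1 ++ [ch], p.2) :: (if p.2 < m then (alph.filter (· ≠ ch)).map (fun c => (p.1 ++ [c], p.2 + 1)) else [])

theorem pvExtB_eq (m : Int) (alph : List Char) (ch : Char) (nxt : List (List Char × Int)) (p : List Char × Int) :
    pvExtB m alph ch nxt p = nxt ++ pvExts m alph ch p := by
  unfold pvExtB pvExts
  split_ifs with h
  · rw [show (fun (nxt : List (List Char × Int)) c => if c ≠ ch then nxt ++ [(p.1 ++ [c], p.2 + 1)] else nxt)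
        = (fun nxt c => if (fun c => decide (c ≠ ch)) c = true then nxt ++ [(fun c => (p.1 ++ [c], p.2 + 1)) c] else nxt) from by
      funext nxt c; simp]
    rw [PySem.List.foldl_append_if]
    simp
  · simp

theorem pvStepB_eq (m : Int) (alph : List Char) (ch : Char) (part : List (List Char × Int)) :
    part.foldl (pvExtB m alph ch) [] = part.flatMap (pvExts m alph ch) := by
  have : pvExtB m alph ch = fun nxt p => nxt ++ pvExts m alph ch p := by
    funext nxt p; exact pvExtB_eq m alph ch nxt p
  rw [this, PySem.List.foldl_append_eq_flatMap, List.nil_append]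

-- the whole expansion, in flatMap form
def pvE (m : Int) (alph : List Char) (ks : List Char) (part : List (List Char × Int)) : List (List Char × Int) :=
  ks.foldl (fun part ch => part.flatMap (pvExts m alph ch)) part

theorem pvE_nil (m : Int) (alph : List Char) (ks : List Char) : pvE m alph ks [] = [] := by
  induction ks with
  | nil => rfl
  | cons ch ks ih => simp [pvE, List.foldl_cons] at ih ⊢; exact ih

theorem pvE_append (m : Int) (alph : List Char) (ks : List Char) :
    ∀ (p1 p2 : List (List Char × Int)), pvE m alph ks (p1 ++ p2) = pvE m alph ks p1 ++ pvE m alph ks p2 := by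
  induction ks with
  | nil => intro p1 p2; rfl
  | cons ch ks ih =>
    intro p1 p2
    simp only [pvE, List.foldl_cons] at ih ⊢
    rw [List.flatMap_append, ih]

theorem pvE_map {α : Type} (m : Int) (alph : List Char) (ks : List Char) (xs : List α) (f : α → List Char × Int) :
    pvE m alph ks (xs.map f) = xs.flatMap (fun x => pvE m alph ks [f x]) := by
  induction xs with
  | nil => exact pvE_nil m alph ks
  | cons x xs ih =>
    rw [List.map_cons, show f x :: xs.map f = [f x] ++ xs.map f from rfl, pvE_append, ih, List.flatMap_cons]

theorem pvStep_eq (m : Int) (alph : List Char) (ks : List Char) :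
    ∀ (s : List Char) (d : Int), ¬ m < d →
    (ks.foldl (fun part ch => part.foldl (pvExtB m alph ch) []) [(s, d)]).map Prod.fst
      = (pvN m alph ks d).map (s ++ ·) := by
  have hstep : (fun (part : List (List Char × Int)) ch => part.foldl (pvExtB m alph ch) [])
      = fun part ch => part.flatMap (pvExts m alph ch) := by
    funext part ch; exact pvStepB_eq m alph ch part
  rw [hstep]
  show ∀ s d, ¬ m < d → (pvE m alph ks [(s, d)]).map Prod.fst = (pvN m alph ks d).map (s ++ ·)
  induction ks with
  | nil =>
    intro s d _
    simp [pvE, pvN]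
  | cons ch ks ih =>
    intro s d hd
    rw [show pvE m alph (ch :: ks) [(s, d)] = pvE m alph ks (pvExts m alph ch (s, d)) from by simp [pvE]]
    rw [show pvExts m alph ch (s, d)
          = [(s ++ [ch], d)] ++ (if d < m then (alph.filter (· ≠ ch)).map (fun c => (s ++ [c], d + 1)) else []) from rfl]
    rw [pvE_append, List.map_append, ih (s ++ [ch]) d hd]
    rw [show pvN m alph (ch :: ks) d
          = ((pvN m alph ks d).map (ch :: ·))
            ++ (if d < m then (alph.filter (· ≠ ch)).flatMap (fun c => (pvN m alph ks (d + 1)).map (c :: ·)) else []) from by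
      rw [pvN]]
    rw [List.map_append]
    congr 1
    · rw [List.map_map]
      exact List.map_congr_left fun t _ => by simp
    · by_cases hdm : d < m
      · rw [if_pos hdm, if_pos hdm, pvE_map, List.map_flatMap, List.map_flatMap]
        congr 1
        funext c
        rw [ih (s ++ [c]) (d + 1) (by omega), List.map_map]
        exact List.map_congr_left fun t _ => by simp
      · rw [if_neg hdm, if_neg hdm, pvE_nil]
        rfl

theorem pvN_of_le (m : Int) (alph : List Char) : ∀ (ks : List Char) (d : Int), ¬ d < m → pvN m alph ks d = [ks] := by
  intro ks
  induction ks with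
  | nil => intro d _; rfl
  | cons ch ks ih => intro d hd; rw [pvN, if_neg hd, ih d hd]; rfl

theorem pvAlt_eq (kmer : String) (m : Int) (alphabet : String) (h : ¬ m < 0) :
    generate_mismatch_neighbors_alt kmer m alphabet
      = PySem.Set.ofList ((pvN m alphabet.toList kmer.toList 0).map String.ofList) := by
  simp only [generate_mismatch_neighbors_alt, if_neg h]
  congr 1
  rw [show (fun (p : List Char × Int) => String.ofList p.1) = String.ofList ∘ Prod.fst from rfl,
    ← List.map_map, pvStep_eq m alphabet.toList kmer.toList [] 0 h, List.map_map]
  simp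

-- ===== VERDICT (by name: the statement is the Claim_ definition above) =====
theorem generate_mismatch_neighbors_spec : Claim_equal_generate_mismatch_neighbors := by
  intro kmer m alphabet _
  unfold Spec_generate_mismatch_neighbors
  by_cases hneg : m < 0
  · rw [generate_mismatch_neighbors, if_neg (by omega), pvGenA.eq_def, if_pos hneg,
      generate_mismatch_neighbors_alt, if_pos hneg]
    rfl
  · rw [pvAlt_eq kmer m alphabet hneg]
    by_cases h0 : m = 0
    · subst h0
      rw [generate_mismatch_neighbors, if_pos rfl, pvN_of_le 0 alphabet.toList kmer.toList 0 (by omega)]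
      simp [PySem.Set.ofList, PySem.Set.add, String.ofList_toList]
    · rw [generate_mismatch_neighbors, if_neg h0,
        pvGenA_eq m alphabet.toList kmer.toList [] 0 PySem.Set.empty (by omega),
        PySem.Set.ofList_eq_foldl]
      simp
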